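-- pv_equiv track=rewrite | github.com/letthem/CodingTest | 프로그래머스/3/258709. 주사위 고르기/주사위 고르기.py | solution
-- ===== SOURCE A (Python) =====
-- from itertools import combinations, product
--
-- def solution(dice):
--     n = len(dice)
--
--     answer = []
--     cases = list(combinations(range(n), n//2)) # A가 주사위를 뽑는 경우의 수 nC(n//2)
--     # combinations()가 기본적으로 한 번만 순회 가능한 이터레이터를 반환하기 때문에 list로 반환해서 계속 사용할 수 있도록 하자.
--     # ex) cases = [(0, 1), (0, 2), (0, 3), (1, 2), (1, 3), (2, 3)]
--
--     A = [] # 각 조합별 합의 경우의 수 저장 리스트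
--
--     for case in cases:
--         # 선택된 주사위들의 값 가져오기
--         selected_dice = [dice[i] for i in case]
--
--         # 모든 가능한 조합의 합을 구하고 정렬
--         all_sums = sorted(sum(comb) for comb in product(*selected_dice))
--
--         # 결과 리스트에 추가
--         A.append(all_sums)
--         # ex)
--             # A[0] = [4, 5, 5, 6]   # (0,1) 선택
--             # A[1] = [6, 7, 7, 8]   # (0,2) 선택
--             # A[2] = [8, 9, 9, 10]  # (0,3) 선택
--             # A[3] = [8, 9, 9, 10]  # (1,2) 선택
--             # A[4] = [10, 11, 11, 12]  # (1,3) 선택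
--             # A[5] = [12, 13, 13, 14]  # (2,3) 선택
--
--     a, counts = 0, len(A)  # a: 최댓값 저장, counts: 조합의 개수
--
--     for i in range(counts):
--         B = A[counts - i - 1]  # A[i]의 반대편 조합을 가져옴 (대칭되는 B)
--
--         temp = 0  # A[i]가 B보다 이기는 횟수
--
--         for t in A[i]:  # A[i]의 각 값 t에 대해
--             left = 0
--             right = len(B) - 1
--
--             while left <= right:  # 이진 탐색 시작
--                 mid = (left + right) // 2  # 중앙값 찾기
--
--                 if B[mid] < t:  # B[mid]가 t보다 작으면
--                     left = mid + 1  # 탐색 범위를 오른쪽으로 이동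
--                 else:
--                     right = mid - 1  # 탐색 범위를 왼쪽으로 이동
--
--             temp += left  # B에서 t보다 작은 값의 개수를 left가 가리킴
--
--         # 가장 승리 확률이 높은 조합 찾기
--         if a < temp:  # 현재 저장된 최대 승리 횟수 a보다 더 높은 temp를 발견하면 갱신
--             a = temp  # 최대 승리 횟수 업데이트
--             answer = [x + 1 for x in cases[i]]  # 1-based index로 변환하여 저장
--
--     return answer
-- ===== SOURCE B (Python) =====
-- from itertools import combinations
--
-- def solution(dice):
--     n = len(dice)
--     cases = list(combinations(range(n), n // 2))
--
--     # Sum distributions as sorted (sum, count) run-length lists, built by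
--     # convolution: merging duplicate partial sums keeps each list small.
--     dists = []
--     for case in cases:
--         dist = [(0, 1)]
--         for i in case:
--             pairs = sorted(((s + v, c) for (s, c) in dist for v in dice[i]),
--                            key=lambda p: p[0])
--             comp = []
--             for s, c in pairs:
--                 if comp and comp[-1][0] == s:
--                     comp[-1] = (s, comp[-1][1] + c)
--                 else:
--                     comp.append((s, c))
--             dist = comp
--         dists.append(dist)
--
--     best, answer = 0, []
--     m = len(cases)
--     for i in range(m):
--         P = dists[i]
--         Q = dists[m - 1 - i]  # distribution of the complementary pick
--         total = 0
--         cum = 0   # opponent outcomes seen so far that are < current s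
--         j = 0
--         for s, c in P:
--             while j < len(Q) and Q[j][0] < s:
--                 cum += Q[j][1]
--                 j += 1
--             total += c * cum
--         if best < total:
--             best = total
--             answer = [x + 1 for x in cases[i]]
--     return answer
-- ===== Notes on version B (the rewrite author's own statement) =====
-- stated objective: alternative
-- what changed: Instead of materialising and sorting all 6^(n/2) pairwise sums per combination and binary-searching each of them, B builds each combination's sum distribution as a run-length (sum,count) list by convolution (sort+compress per die, so duplicate sums collapse) and counts wins with a single linear two-pointer merge of the two distributions; intended as faster (measured 7.96x at n=16 and 2.29x at n=64 in a timing run, unconfirmed at the largest size).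
import Mathlib
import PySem

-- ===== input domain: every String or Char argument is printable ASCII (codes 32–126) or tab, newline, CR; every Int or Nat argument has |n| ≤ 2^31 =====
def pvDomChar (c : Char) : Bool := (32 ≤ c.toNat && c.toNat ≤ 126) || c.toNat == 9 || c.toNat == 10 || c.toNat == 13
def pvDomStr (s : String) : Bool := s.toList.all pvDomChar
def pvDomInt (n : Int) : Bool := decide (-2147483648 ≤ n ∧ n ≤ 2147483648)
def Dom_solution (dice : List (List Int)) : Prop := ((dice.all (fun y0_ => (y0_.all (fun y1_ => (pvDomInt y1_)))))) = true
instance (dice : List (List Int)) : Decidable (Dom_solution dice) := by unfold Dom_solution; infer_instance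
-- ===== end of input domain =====

-- B replaces A's per-combination 6^(n/2)-element sorted sum list + hand-written binary search
-- by run-length (sum, count) distributions built by convolution and a linear two-pointer merge.

-- ===== PORT A =====
-- sum(comb) for comb in product(*sel): partial-sum fold (product's tuple arity varies, so the
-- tuple-then-sum is ported as the standard running-sum fold over the same dice, same order)
def prodSumsA (sel : List (List Int)) : List Int :=
  sel.foldl (fun acc die => acc.flatMap (fun s => die.map (fun v => s + v))) [0]

-- A's while-loop binary search; fuel = len(B)+1 is an upper bound on the iterations (the
-- window shrinks strictly each turn), so the fuel guard is never hit — a totality guard only.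
def bsLoopA (B : List Int) (t : Int) : Nat → Int → Int → Int
  | 0, left, _ => left
  | fuel+1, left, right =>
    if left ≤ right then
      let mid := PySem.Int.floordiv (left + right) 2
      match PySem.List.pyGet? B mid with
      | some v => if v < t then bsLoopA B t fuel (mid+1) right else bsLoopA B t fuel left (mid-1)
      | none => left   -- unreachable (mid always in range); totality guard
    else left

def tempA (Ai B : List Int) : Int :=
  Ai.foldl (fun acc t => acc + bsLoopA B t (B.length + 1) 0 ((B.length : Int) - 1)) 0

def solution (dice : List (List Int)) : List Int :=
  let n := dice.length
  let cases := PySem.List.combinations (PySem.List.pyRange 0 (n : Int) 1) (n / 2)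
  let A_ := cases.foldl (fun acc case =>
      acc ++ [PySem.List.sorted (prodSumsA (case.map (fun i => PySem.List.pyGetD dice i []))) (fun x => x) false])
    ([] : List (List Int))
  let counts := A_.length
  let st := (PySem.List.pyRange 0 (counts : Int) 1).foldl (fun (st : Int × List Int) i =>
      let Bl := PySem.List.pyGetD A_ ((counts : Int) - i - 1) []
      let temp := tempA (PySem.List.pyGetD A_ i []) Bl
      if st.1 < temp then (temp, (PySem.List.pyGetD cases i []).map (· + 1)) else st)
    ((0 : Int), ([] : List Int))
  st.2

-- ===== PORT B =====
-- groupby(pairs, key=fst) + per-group count sum (Source B's compress comprehension)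
def compressB : List (Int × Int) → List (Int × Int)
  | [] => []
  | sc :: rest =>
    (sc.1, sc.2 + ((rest.takeWhile (fun p => p.1 == sc.1)).map (·.2)).sum)
      :: compressB (rest.dropWhile (fun p => p.1 == sc.1))
  termination_by l => l.length
  decreasing_by simp only [List.length_cons]; exact Nat.lt_succ_of_le (List.length_dropWhile_le _ _)

def convStepB (die : List Int) (dist : List (Int × Int)) : List (Int × Int) :=
  compressB (PySem.List.sorted (dist.flatMap (fun sc => die.map (fun v => (sc.1 + v, sc.2)))) (fun p => p.1) false)

def distOfB (dice : List (List Int)) (case : List Int) : List (Int × Int) :=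
  case.foldl (fun dist i => convStepB (PySem.List.pyGetD dice i []) dist) [(0, 1)]

-- the inner 'while j < len(Q) and Q[j][0] < s' loop; fuel = len(Q)+1 bounds its iterations
def advanceB (Q : List (Int × Int)) (s : Int) : Nat → Int → Int → Int × Int
  | 0, j, cum => (j, cum)
  | fuel+1, j, cum =>
    match PySem.List.pyGet? Q j with
    | some ud => if ud.1 < s then advanceB Q s fuel (j + 1) (cum + ud.2) else (j, cum)
    | none => (j, cum)

def mergeB (P Q : List (Int × Int)) : Int :=
  (P.foldl (fun (st : Int × Int × Int) sc =>
      let r := advanceB Q sc.1 (Q.length + 1) st.2.1 st.2.2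
      (st.1 + sc.2 * r.2, r.1, r.2)) ((0 : Int), (0 : Int), (0 : Int))).1

def solution_alt (dice : List (List Int)) : List Int :=
  let n := dice.length
  let cases := PySem.List.combinations (PySem.List.pyRange 0 (n : Int) 1) (n / 2)
  let dists := cases.foldl (fun acc case => acc ++ [distOfB dice case]) ([] : List (List (Int × Int)))
  let m := cases.length
  let st := (PySem.List.pyRange 0 (m : Int) 1).foldl (fun (st : Int × List Int) i =>
      let P := PySem.List.pyGetD dists i []
      let Q := PySem.List.pyGetD dists ((m : Int) - 1 - i) []
      let total := mergeB P Q
      if st.1 < total then (total, (PySem.List.pyGetD cases i []).map (· + 1)) else st)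
    ((0 : Int), ([] : List Int))
  st.2

-- ===== PRECONDITION & SPEC =====
def Spec_solution (dice : List (List Int)) (out : List Int) : Prop := out = solution_alt dice
instance (dice : List (List Int)) (out : List Int) : Decidable (Spec_solution dice out) := by unfold Spec_solution; infer_instance

-- ===== CLAIM (what is proved, stated in full; the proofs are below) =====
def Claim_equal_solution : Prop := ∀ (dice : List (List Int)), Dom_solution dice → Spec_solution dice (solution dice)


-- ===== LEMMAS AND PROOFS =====

-- weighted sum of a run-length (sum, count) list under f (proof-only)
def wsumB (l : List (Int × Int)) (f : Int → Int) : Int := (l.map (fun sc => sc.2 * f sc.1)).sum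

-- weighted count of entries of Q with key < s, prefix form (proof-only)
def lwtB (Q : List (Int × Int)) (s : Int) : Int :=
  ((Q.takeWhile (fun p => decide (p.1 < s))).map (fun p => p.2)).sum

theorem wsumB_perm (l1 l2 : List (Int × Int)) (h : l1.Perm l2) (f : Int → Int) :
    wsumB l1 f = wsumB l2 f := (h.map _).sum_eq

theorem wsumB_cons (sc : Int × Int) (l : List (Int × Int)) (f : Int → Int) :
    wsumB (sc :: l) f = sc.2 * f sc.1 + wsumB l f := by simp [wsumB]

theorem compressB_wsum (l : List (Int × Int)) (f : Int → Int) :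
    wsumB (compressB l) f = wsumB l f := by
  induction l using compressB.induct with
  | case1 => simp [compressB]
  | case2 sc rest ih =>
    rw [compressB, wsumB_cons, ih, wsumB_cons]
    have hsplit : rest = rest.takeWhile (fun p => p.1 == sc.1) ++ rest.dropWhile (fun p => p.1 == sc.1) :=
      (List.takeWhile_append_dropWhile).symm
    have hgrp : wsumB (rest.takeWhile (fun p => p.1 == sc.1)) f
        = ((rest.takeWhile (fun p => p.1 == sc.1)).map (fun p => p.2)).sum * f sc.1 := by
      unfold wsumB
      rw [← List.sum_map_mul_right]
      congr 1
      apply List.map_congr_left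
      intro p hp
      have := List.mem_takeWhile_imp hp
      have hk : p.1 = sc.1 := by simpa using this
      rw [hk]
    conv_rhs => rw [hsplit]
    unfold wsumB
    rw [List.map_append, List.sum_append]
    have := hgrp
    unfold wsumB at this
    rw [this]
    ring

theorem compressB_key_mem (l : List (Int × Int)) :
    ∀ p ∈ compressB l, ∃ q ∈ l, p.1 = q.1 := by
  induction l using compressB.induct with
  | case1 => simp [compressB]
  | case2 sc rest ih =>
    intro p hp
    rw [compressB] at hp
    rcases List.mem_cons.mp hp with hp | hp
    · exact ⟨sc, List.mem_cons_self, by simp [hp]⟩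
    · rcases ih p hp with ⟨q, hq, hpq⟩
      exact ⟨q, List.mem_cons_of_mem _ ((List.dropWhile_sublist _).mem hq), hpq⟩

theorem compressB_sorted (l : List (Int × Int)) (h : l.Pairwise (fun a b => a.1 ≤ b.1)) :
    (compressB l).Pairwise (fun a b => a.1 ≤ b.1) := by
  induction l using compressB.induct with
  | case1 => simp [compressB]
  | case2 sc rest ih =>
    rw [compressB]
    rw [List.pairwise_cons] at h ⊢
    refine ⟨?_, ih (List.Pairwise.sublist (List.dropWhile_sublist _) h.2)⟩
    intro b hb
    rcases compressB_key_mem _ b hb with ⟨q, hq, hbq⟩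
    have : q ∈ rest := (List.dropWhile_sublist _).mem hq
    simpa [hbq] using h.1 q this

theorem convStepB_sorted (die : List Int) (dist : List (Int × Int)) :
    (convStepB die dist).Pairwise (fun a b => a.1 ≤ b.1) :=
  compressB_sorted _ (PySem.List.sorted_pairwise _ _)

theorem convStepB_wsum (die : List Int) (dist : List (Int × Int)) (f : Int → Int) :
    wsumB (convStepB die dist) f = wsumB dist (fun s => (die.map (fun v => f (s + v))).sum) := by
  unfold convStepB
  rw [compressB_wsum]
  rw [wsumB_perm _ _ (PySem.List.sorted_perm _ _ _) f]
  unfold wsumB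
  rw [List.map_flatMap, List.flatMap_def, List.sum_flatten, List.map_map]
  congr 1
  apply List.map_congr_left
  intro sc _
  simp only [Function.comp_def, List.map_map]
  exact List.sum_map_mul_left die (fun v => f (sc.1 + v)) sc.2

theorem distOfB_fold_inv (dice : List (List Int)) (case : List Int) :
    ∀ (dist : List (Int × Int)) (L : List Int),
    dist.Pairwise (fun a b => a.1 ≤ b.1) → (∀ f, wsumB dist f = (L.map f).sum) →
    (case.foldl (fun d i => convStepB (PySem.List.pyGetD dice i []) d) dist).Pairwise (fun a b => a.1 ≤ b.1) ∧
    ∀ f, wsumB (case.foldl (fun d i => convStepB (PySem.List.pyGetD dice i []) d) dist) f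
        = ((case.foldl (fun acc i => acc.flatMap (fun s => (PySem.List.pyGetD dice i []).map (fun v => s + v))) L).map f).sum := by
  induction case with
  | nil => intro dist L h1 h2; exact ⟨h1, h2⟩
  | cons i rest ih =>
    intro dist L h1 h2
    simp only [List.foldl_cons]
    apply ih
    · exact convStepB_sorted _ _
    · intro f
      rw [convStepB_wsum, h2]
      rw [List.map_flatMap, List.flatMap_def, List.sum_flatten, List.map_map]
      congr 1
      apply List.map_congr_left
      intro s _
      simp [Function.comp_def]

theorem distOfB_inv (dice : List (List Int)) (case : List Int) :
    (distOfB dice case).Pairwise (fun a b => a.1 ≤ b.1) ∧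
    ∀ f, wsumB (distOfB dice case) f
        = ((prodSumsA (case.map (fun i => PySem.List.pyGetD dice i []))).map f).sum := by
  have h := distOfB_fold_inv dice case [(0, 1)] [0] (by simp) (by intro f; simp [wsumB])
  unfold distOfB prodSumsA
  rw [List.foldl_map]
  exact h

-- ===== binary search (A) returns the count of elements < t in a sorted list =====

theorem seg_all_lt (B : List Int) (t : Int) (hs : B.Pairwise (· ≤ ·)) (l m : Int)
    (h0 : 0 ≤ l) (h1 : l ≤ m) (h2 : m < (B.length : Int))
    (hv : B[m.toNat]'(by omega) < t) :
    ((B.drop l.toNat).take (m + 1 - l).toNat).countP (fun b => decide (b < t)) = (m + 1 - l).toNat := by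
  have hlen : ((B.drop l.toNat).take (m + 1 - l).toNat).length = (m + 1 - l).toNat := by
    simp [List.length_take, List.length_drop]; omega
  have hcp : ((B.drop l.toNat).take (m + 1 - l).toNat).countP (fun b => decide (b < t))
      = ((B.drop l.toNat).take (m + 1 - l).toNat).length := by
    apply List.countP_eq_length.mpr
    intro x hx
    rw [List.mem_iff_getElem] at hx
    rcases hx with ⟨k, hk, hkx⟩
    rw [List.getElem_take, List.getElem_drop] at hkx
    have hklt : l.toNat + k ≤ m.toNat := by
      rw [hlen] at hk; omega
    have hle : B[l.toNat + k]'(by omega) ≤ B[m.toNat]'(by omega) := by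
      rcases Nat.lt_or_ge (l.toNat + k) m.toNat with h | h
      · exact (List.pairwise_iff_getElem.mp hs) _ _ (by omega) (by omega) h
      · have : l.toNat + k = m.toNat := by omega
        simp [this]
    rw [← hkx]
    simp only [decide_eq_true_eq]
    omega
  rw [hcp, hlen]

theorem seg_all_ge (B : List Int) (t : Int) (hs : B.Pairwise (· ≤ ·)) (m : Int) (n : Nat)
    (h0 : 0 ≤ m) (hm : m < (B.length : Int))
    (hv : ¬ B[m.toNat]'(by omega) < t) :
    ((B.drop m.toNat).take n).countP (fun b => decide (b < t)) = 0 := by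
  apply List.countP_eq_zero.mpr
  intro x hx
  have hx' : x ∈ B.drop m.toNat := List.mem_of_mem_take hx
  rw [List.mem_iff_getElem] at hx'
  rcases hx' with ⟨k, hk, hkx⟩
  rw [List.getElem_drop] at hkx
  have hge : B[m.toNat]'(by omega) ≤ B[m.toNat + k]'(by simp at hk; omega) := by
    rcases Nat.eq_zero_or_pos k with h | h
    · simp [h]
    · exact (List.pairwise_iff_getElem.mp hs) _ _ (by omega) (by simp at hk; omega) (by omega)
  rw [← hkx]
  simp only [decide_eq_true_eq]
  omega

theorem seg_split (B : List Int) (t : Int) (l m r : Int)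
    (h0 : 0 ≤ l) (h1 : l ≤ m + 1) (h2 : m ≤ r) :
    ((B.drop l.toNat).take (r + 1 - l).toNat).countP (fun b => decide (b < t))
    = ((B.drop l.toNat).take (m + 1 - l).toNat).countP (fun b => decide (b < t))
      + ((B.drop (m + 1).toNat).take (r - m).toNat).countP (fun b => decide (b < t)) := by
  have ha : (r + 1 - l).toNat = (m + 1 - l).toNat + (r - m).toNat := by omega
  rw [ha, List.take_add, List.countP_append, List.drop_drop]
  have hb : l.toNat + (m + 1 - l).toNat = (m + 1).toNat := by omega
  rw [hb]

theorem bsLoopA_window (B : List Int) (t : Int) (hs : B.Pairwise (· ≤ ·)) :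
    ∀ (fuel : Nat) (left right : Int), 0 ≤ left → right < (B.length : Int) → left ≤ right + 1 →
    (right + 1 - left).toNat ≤ fuel →
    bsLoopA B t fuel left right
      = left + (((B.drop left.toNat).take (right + 1 - left).toNat).countP (fun b => decide (b < t)) : Int) := by
  intro fuel
  induction fuel with
  | zero =>
    intro left right hl hr hlr hf
    have : (right + 1 - left).toNat = 0 := by omega
    simp [bsLoopA, this]
  | succ f ih =>
    intro left right hl hr hlr hf
    rw [bsLoopA]
    by_cases hcmp : left ≤ right
    · simp only [if_pos hcmp]
      have hmid := PySem.Int.floordiv_two_mid_bounds hcmp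
      set mid := PySem.Int.floordiv (left + right) 2 with hmiddef
      have hm0 : 0 ≤ mid := le_trans hl hmid.1
      have hmlen : mid < (B.length : Int) := lt_of_le_of_lt hmid.2 hr
      rw [PySem.List.pyGet?_eq_some_getElem B hm0 hmlen]
      by_cases hv : B[mid.toNat]'(by omega) < t
      · simp only [if_pos hv]
        rw [ih (mid + 1) right (by omega) hr (by omega) (by omega)]
        have e1 : right + 1 - (mid + 1) = right - mid := by ring
        rw [e1]
        rw [seg_split B t left mid right hl (by omega) hmid.2]
        have hcnt := seg_all_lt B t hs left mid hl hmid.1 hmlen hv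
        rw [hcnt]
        push_cast
        omega
      · simp only [if_neg hv]
        rw [ih left (mid - 1) hl (by omega) (by omega) (by omega)]
        rw [seg_split B t left (mid - 1) right hl (by omega) (by omega)]
        have hmm : mid - 1 + 1 = mid := by ring
        rw [hmm]
        rw [seg_all_ge B t hs mid _ hm0 hmlen hv]
        omega
    · simp only [if_neg hcmp]
      have : (right + 1 - left).toNat = 0 := by omega
      simp [this]

theorem bsLoopA_count (B : List Int) (t : Int) (hs : B.Pairwise (· ≤ ·)) :
    bsLoopA B t (B.length + 1) 0 ((B.length : Int) - 1)
      = (B.countP (fun b => decide (b < t)) : Int) := by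
  rw [bsLoopA_window B t hs (B.length + 1) 0 ((B.length : Int) - 1) le_rfl (by omega) (by omega) (by omega)]
  have h1 : ((B.length : Int) - 1 + 1 - 0).toNat = B.length := by omega
  rw [h1]
  simp

-- ===== the two-pointer merge (B) =====

theorem takeWhile_drop_of_le {α : Type} (p : α → Bool) :
    ∀ (Q : List α) (n : Nat), n ≤ (Q.takeWhile p).length →
    (Q.drop n).takeWhile p = (Q.takeWhile p).drop n := by
  intro Q
  induction Q with
  | nil => intro n h; simp
  | cons q rest ih =>
    intro n h
    cases n with
    | zero => simp
    | succ k =>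
      by_cases hq : p q
      · simp only [List.takeWhile_cons, if_pos hq] at h ⊢
        simp only [List.drop_succ_cons, List.length_cons] at h ⊢
        exact ih k (by omega)
      · simp [hq] at h
  
theorem takeWhile_length_mono {α : Type} (p q : α → Bool) (h : ∀ a, p a = true → q a = true) :
    ∀ (l : List α), (l.takeWhile p).length ≤ (l.takeWhile q).length := by
  intro l
  induction l with
  | nil => simp
  | cons a rest ih =>
    by_cases ha : p a
    · simp [ha, h a ha]; omega
    · simp [List.takeWhile_cons, ha]

theorem advanceB_spec (Q : List (Int × Int)) (s : Int) :
    ∀ (fuel : Nat) (j cum : Int), 0 ≤ j →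
    ((Q.drop j.toNat).takeWhile (fun p => decide (p.1 < s))).length + 1 ≤ fuel →
    advanceB Q s fuel j cum
      = (j + (((Q.drop j.toNat).takeWhile (fun p => decide (p.1 < s))).length : Int),
         cum + (((Q.drop j.toNat).takeWhile (fun p => decide (p.1 < s))).map (fun p => p.2)).sum) := by
  intro fuel
  induction fuel with
  | zero => intro j cum h0 hf; omega
  | succ f ih =>
    intro j cum h0 hf
    rw [advanceB]
    rw [PySem.List.pyGet?_of_nonneg Q h0]
    rw [← List.head?_drop]
    cases hD : Q.drop j.toNat with
    | nil => simp
    | cons ud rest =>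
      rw [hD] at hf
      simp only [List.head?_cons]
      by_cases hud : ud.1 < s
      · simp only [if_pos hud]
        have hdrop : Q.drop (j + 1).toNat = rest := by
          have : (j + 1).toNat = j.toNat + 1 := by omega
          rw [this, ← List.drop_drop, hD]
          simp
        have hf' : ((Q.drop (j + 1).toNat).takeWhile (fun p => decide (p.1 < s))).length + 1 ≤ f := by
          rw [hdrop]
          simp only [List.takeWhile_cons, decide_eq_true_eq, if_pos hud, List.length_cons] at hf
          omega
        rw [ih (j + 1) (cum + ud.2) (by omega) hf']
        rw [hdrop]
        simp only [List.takeWhile_cons, decide_eq_true_eq, if_pos hud, List.length_cons,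
          List.map_cons, List.sum_cons, Prod.mk.injEq]
        constructor
        · push_cast; ring
        · ring
      · simp only [if_neg hud]
        simp [hud]

theorem mergeB_fold (Q : List (Int × Int)) :
    ∀ (P : List (Int × Int)), P.Pairwise (fun a b => a.1 ≤ b.1) →
    ∀ (total j cum : Int), 0 ≤ j →
    (∀ sc ∈ P, j.toNat ≤ (Q.takeWhile (fun p => decide (p.1 < sc.1))).length) →
    cum = ((Q.take j.toNat).map (fun p => p.2)).sum →
    (P.foldl (fun (st : Int × Int × Int) sc =>
        let r := advanceB Q sc.1 (Q.length + 1) st.2.1 st.2.2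
        (st.1 + sc.2 * r.2, r.1, r.2)) (total, j, cum)).1
      = total + (P.map (fun sc => sc.2 * lwtB Q sc.1)).sum := by
  intro P
  induction P with
  | nil => intro _ total j cum _ _ _; simp
  | cons sc rest ih =>
    intro hP total j cum h0 hinv hcum
    rw [List.pairwise_cons] at hP
    simp only [List.foldl_cons]
    set tw := Q.takeWhile (fun p => decide (p.1 < sc.1)) with htw
    have hjtw : j.toNat ≤ tw.length := hinv sc List.mem_cons_self
    have htwpre : tw = Q.take tw.length := List.prefix_iff_eq_take.mp (List.takeWhile_prefix _)
    have hdropeq : (Q.drop j.toNat).takeWhile (fun p => decide (p.1 < sc.1)) = tw.drop j.toNat :=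
      takeWhile_drop_of_le _ Q j.toNat hjtw
    have hfuel : ((Q.drop j.toNat).takeWhile (fun p => decide (p.1 < sc.1))).length + 1 ≤ Q.length + 1 := by
      have h1 := ((List.takeWhile_prefix (l := Q.drop j.toNat) (fun p => decide (p.1 < sc.1)))).length_le
      have h2 : (Q.drop j.toNat).length ≤ Q.length := by simp
      omega
    rw [advanceB_spec Q sc.1 (Q.length + 1) j cum h0 hfuel]
    simp only [hdropeq]
    have hjlen : (j + ((tw.drop j.toNat).length : Int)).toNat = tw.length := by
      simp only [List.length_drop]; omega
    have htake : tw.take j.toNat = Q.take j.toNat := by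
      rw [htwpre, List.take_take]
      congr 1
      omega
    have hcum' : cum + ((tw.drop j.toNat).map (fun p => p.2)).sum = lwtB Q sc.1 := by
      rw [hcum, ← htake, ← List.sum_append, ← List.map_append, List.take_append_drop]
      rfl
    rw [ih hP.2 (total + sc.2 * (cum + ((tw.drop j.toNat).map (fun p => p.2)).sum))
        (j + ((tw.drop j.toNat).length : Int)) (cum + ((tw.drop j.toNat).map (fun p => p.2)).sum)
        (by omega) ?_ ?_]
    · rw [hcum']
      simp [List.map_cons]
      ring
    · intro sc' hsc'
      rw [hjlen]
      have hmono := takeWhile_length_mono (fun p => decide (p.1 < sc.1)) (fun p => decide (p.1 < sc'.1))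
        (by intro a ha
            simp only [decide_eq_true_eq] at ha ⊢
            exact lt_of_lt_of_le ha (hP.1 sc' hsc')) Q
      exact hmono
    · rw [hjlen, ← htwpre, hcum, ← htake, ← List.sum_append, ← List.map_append, List.take_append_drop]

theorem mergeB_eq (P Q : List (Int × Int)) (hP : P.Pairwise (fun a b => a.1 ≤ b.1)) :
    mergeB P Q = (P.map (fun sc => sc.2 * lwtB Q sc.1)).sum := by
  unfold mergeB
  rw [mergeB_fold Q P hP 0 0 0 le_rfl (by intro sc _; simp) (by simp)]
  simp

theorem lwtB_sorted (Q : List (Int × Int)) (s : Int) (hQ : Q.Pairwise (fun a b => a.1 ≤ b.1)) :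
    lwtB Q s = wsumB Q (fun u => if u < s then 1 else 0) := by
  induction Q with
  | nil => simp [lwtB, wsumB]
  | cons q rest ih =>
    rw [List.pairwise_cons] at hQ
    by_cases hq : q.1 < s
    · rw [wsumB_cons]
      unfold lwtB
      simp only [List.takeWhile_cons, decide_eq_true_eq, if_pos hq, List.map_cons, List.sum_cons]
      rw [← ih hQ.2]
      unfold lwtB
      ring
    · unfold lwtB
      simp only [List.takeWhile_cons, decide_eq_true_eq, if_neg hq, List.map_nil, List.sum_nil]
      rw [wsumB_cons]
      have hz : wsumB rest (fun u => if u < s then 1 else 0) = 0 := by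
        unfold wsumB
        apply List.sum_eq_zero
        intro x hx
        rw [List.mem_map] at hx
        rcases hx with ⟨p, hp, hpx⟩
        have hns : ¬ p.1 < s := by
          have := hQ.1 p hp
          omega
        rw [← hpx]
        show p.2 * (if p.1 < s then 1 else 0) = 0
        rw [if_neg hns, mul_zero]
      rw [hz, if_neg hq]
      ring

-- ===== per-pair: A's binary-search win count = B's merge win count =====

theorem temp_eq_merge (dice : List (List Int)) (c1 c2 : List Int) :
    tempA (PySem.List.sorted (prodSumsA (c1.map (fun i => PySem.List.pyGetD dice i []))) (fun x => x) false)
          (PySem.List.sorted (prodSumsA (c2.map (fun i => PySem.List.pyGetD dice i []))) (fun x => x) false)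
      = mergeB (distOfB dice c1) (distOfB dice c2) := by
  set L1 := prodSumsA (c1.map (fun i => PySem.List.pyGetD dice i [])) with hL1
  set L2 := prodSumsA (c2.map (fun i => PySem.List.pyGetD dice i [])) with hL2
  set S2 := PySem.List.sorted L2 (fun x => x) false with hS2
  have hS2sorted : S2.Pairwise (· ≤ ·) := PySem.List.sorted_pairwise L2 (fun x => x)
  have hS2perm : S2.Perm L2 := PySem.List.sorted_perm L2 (fun x => x) false
  have inv1 := distOfB_inv dice c1
  have inv2 := distOfB_inv dice c2
  -- LHS
  unfold tempA
  rw [PySem.List.foldl_add]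
  have hbs : ∀ t : Int, bsLoopA S2 t (S2.length + 1) 0 ((S2.length : Int) - 1)
      = (L2.countP (fun b => decide (b < t)) : Int) := by
    intro t
    rw [bsLoopA_count S2 t hS2sorted, hS2perm.countP_eq]
  have hmapL : (PySem.List.sorted L1 (fun x => x) false).map
        (fun t => bsLoopA S2 t (S2.length + 1) 0 ((S2.length : Int) - 1))
      = (PySem.List.sorted L1 (fun x => x) false).map (fun t => (L2.countP (fun b => decide (b < t)) : Int)) := by
    apply List.map_congr_left; intro t _; exact hbs t
  rw [hmapL]
  rw [((PySem.List.sorted_perm L1 (fun x => x) false).map _).sum_eq]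
  -- RHS
  rw [mergeB_eq _ _ inv1.1]
  have hpoint : ∀ s : Int, lwtB (distOfB dice c2) s = (L2.countP (fun b => decide (b < s)) : Int) := by
    intro s
    rw [lwtB_sorted _ _ inv2.1, inv2.2]
    have : (L2.map (fun u => if u < s then (1 : Int) else 0))
        = (L2.map (fun u => if (fun b => decide (b < s)) u = true then (1 : Int) else 0)) := by
      simp
    rw [this, PySem.List.sum_map_ite_one_zero]
  have hmapR : (distOfB dice c1).map (fun sc => sc.2 * lwtB (distOfB dice c2) sc.1)
      = (distOfB dice c1).map (fun sc => sc.2 * (L2.countP (fun b => decide (b < sc.1)) : Int)) := by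
    apply List.map_congr_left; intro sc _; rw [hpoint]
  rw [hmapR]
  have hfin := inv1.2 (fun s => (L2.countP (fun b => decide (b < s)) : Int))
  unfold wsumB at hfin
  rw [zero_add]
  exact hfin.symm

-- ===== top level =====

theorem pyGetD_map_getElem {α β : Type} (f : α → β) (xs : List α) (i : Int) (d : β)
    (h0 : 0 ≤ i) (h1 : i < (xs.length : Int)) :
    PySem.List.pyGetD (xs.map f) i d = f (xs[i.toNat]'(by omega)) := by
  rw [PySem.List.pyGetD_of_nonneg _ _ h0]
  rw [List.getD_eq_getElem _ _ (by simp; omega)]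
  simp

theorem main_core (dice : List (List Int)) : solution dice = solution_alt dice := by
  unfold solution solution_alt
  simp only []
  rw [PySem.List.foldl_append_singleton_eq_map, PySem.List.foldl_append_singleton_eq_map]
  rw [List.nil_append, List.nil_append, List.length_map]
  set cases := PySem.List.combinations (PySem.List.pyRange 0 (dice.length : Int) 1) (dice.length / 2) with hcases
  set g := fun (c : List Int) => PySem.List.sorted (prodSumsA (c.map (fun i => PySem.List.pyGetD dice i []))) (fun x => x) false with hg
  congr 1
  apply PySem.List.foldl_congr_mem
  intro acc i hi
  rw [PySem.List.mem_pyRange_one] at hi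
  have hlen : i.toNat < cases.length := by omega
  have hidx : (cases.length : Int) - i - 1 = (cases.length : Int) - 1 - i := by ring
  have hlen2 : ((cases.length : Int) - 1 - i).toNat < cases.length := by omega
  rw [hidx]
  rw [pyGetD_map_getElem g cases i [] (by omega) (by omega)]
  rw [pyGetD_map_getElem g cases ((cases.length : Int) - 1 - i) [] (by omega) (by omega)]
  rw [pyGetD_map_getElem (distOfB dice) cases i [] (by omega) (by omega)]
  rw [pyGetD_map_getElem (distOfB dice) cases ((cases.length : Int) - 1 - i) [] (by omega) (by omega)]
  rw [temp_eq_merge dice (cases[i.toNat]'hlen) (cases[((cases.length : Int) - 1 - i).toNat]'hlen2)]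

-- ===== VERDICT (by name: the statement is the Claim_ definition above) =====
theorem solution_spec : Claim_equal_solution := by
  intro dice _
  unfold Spec_solution
  exact main_core dice
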